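-- pv_equiv track=rewrite | github.com/apchhi/py_projects | lists/population_date/app.py | out_max_population
-- ===== SOURCE A (Python) =====
-- def out_max_population(start_period,end_period,population):
--     #max_year = start_period
--     max_persons_year = (start_period, population[start_period])
--     min_persons_year = (start_period, population[start_period])
--     for index in range(start_period, end_period+1):
--         persons = population[index]
--         if population[index] > max_persons_year[1]:
--             max_persons_year = (index, population[index])
--         elif population[index] < min_persons_year[1]:
--             min_persons_year = (index, population[index])
--     max = (f"Year with maximum population in period form {start_period} to {end_period} years it's {max_persons_year[0]} with the population = {max_persons_year[1]:,} persons.")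
--     min = (f"Year with minimum population in period form {start_period} to {end_period} years it's {min_persons_year[0]} with the population = {min_persons_year[1]:,} persons.")
--     return min, max
-- ===== SOURCE B (Python) =====
-- def out_max_population(start_period, end_period, population):
--     # an empty period reports the start year
--     years = range(start_period, end_period + 1) or [start_period]
--     max_year = max(years, key=lambda y: population[y])
--     min_year = min(years, key=lambda y: population[y])
--     max_s = (f"Year with maximum population in period form {start_period} to {end_period} years it's {max_year} with the population = {population[max_year]:,} persons.")
--     min_s = (f"Year with minimum population in period form {start_period} to {end_period} years it's {min_year} with the population = {population[min_year]:,} persons.")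
--     return min_s, max_s
-- ===== Notes on version B (the rewrite author's own statement) =====
-- stated objective: simpler
-- what changed: Replaces the hand-rolled coupled max/min accumulator loop (explicit pair state, elif) by two separate builtin max()/min() scans with a key function over the range (falling back to the start year for an empty period); Pre_ excludes only the KeyError inputs, where start_period or some year of the range is not a key of the dict.
import Mathlib
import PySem

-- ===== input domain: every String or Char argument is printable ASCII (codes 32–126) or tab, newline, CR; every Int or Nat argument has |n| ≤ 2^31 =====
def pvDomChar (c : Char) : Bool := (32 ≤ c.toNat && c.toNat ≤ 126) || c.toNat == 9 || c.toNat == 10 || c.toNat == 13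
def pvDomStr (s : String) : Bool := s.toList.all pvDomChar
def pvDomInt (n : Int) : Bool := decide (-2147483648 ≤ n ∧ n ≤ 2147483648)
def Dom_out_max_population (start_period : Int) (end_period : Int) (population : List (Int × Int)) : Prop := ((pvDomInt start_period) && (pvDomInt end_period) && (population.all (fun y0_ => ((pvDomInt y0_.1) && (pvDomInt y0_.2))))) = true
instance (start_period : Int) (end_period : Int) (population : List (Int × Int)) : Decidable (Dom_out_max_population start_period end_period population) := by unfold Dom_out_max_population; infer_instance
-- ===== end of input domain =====

-- B replaces A's single coupled max/min accumulator loop by two separate builtin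
-- max()/min() scans with a key function over the range (same output strings); objective: simpler.


-- ===== shared helpers: dict lookup population[i] (total form, Pre_ guarantees a hit) and the f-string text =====
def pvGetPop (population : List (Int × Int)) (i : Int) : Int := (population.lookup i).getD 0

-- '{v:,}': decimal digits of |v| grouped in threes by ',', '-' in front (exact Python format(v, ','))
def pvCommaRev : List Char → Nat → List Char
  | [], _ => []
  | c :: cs, k =>
    let rest := pvCommaRev cs (k + 1)
    if (k + 1) % 3 == 0 && !cs.isEmpty then c :: ',' :: rest else c :: rest

def pvComma (n : Int) : String :=
  (if n < 0 then "-" else "") ++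
    String.ofList ((pvCommaRev ((PySem.Int.toChars ((n.natAbs : Nat) : Int))).reverse 0).reverse)

-- the f-string, identical in A and B
def pvLine (kind : String) (s e y v : Int) : String :=
  "Year with " ++ kind ++ " population in period form " ++ PySem.Int.toStr s ++ " to " ++
    PySem.Int.toStr e ++ " years it's " ++ PySem.Int.toStr y ++ " with the population = " ++
    pvComma v ++ " persons."

-- ===== PORT A ===== (seed pair, one fold over range(start, end+1) carrying (max_pair, min_pair), elif order kept)
def out_max_population (start_period : Int) (end_period : Int) (population : List (Int × Int)) : String × String :=
  let seed := ((start_period, pvGetPop population start_period), (start_period, pvGetPop population start_period))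
  let st := (PySem.List.pyRange start_period (end_period + 1) 1).foldl
    (fun st index =>
      if pvGetPop population index > st.1.2 then ((index, pvGetPop population index), st.2)
      else if pvGetPop population index < st.2.2 then (st.1, (index, pvGetPop population index))
      else st) seed
  (pvLine "minimum" start_period end_period st.2.1 st.2.2,
   pvLine "maximum" start_period end_period st.1.1 st.1.2)

-- ===== PORT B ===== (two builtin scans max(years, key=…) / min(years, key=…) over the range,
-- which falls back to [start_period] when empty ('range(…) or [start_period]'); years is
-- therefore never empty, so the none branch is unreachable)
def out_max_population_alt (start_period : Int) (end_period : Int) (population : List (Int × Int)) : String × String :=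
  let r := PySem.List.pyRange start_period (end_period + 1) 1
  let years := if r.isEmpty then [start_period] else r
  match PySem.List.max? years (fun y => pvGetPop population y),
        PySem.List.min? years (fun y => pvGetPop population y) with
  | some my, some ny =>
    (pvLine "minimum" start_period end_period ny (pvGetPop population ny),
     pvLine "maximum" start_period end_period my (pvGetPop population my))
  | _, _ => ("", "")

-- ===== PRECONDITION & SPEC =====
-- Pre_ excludes exactly the KeyError inputs: start_period and every year of
-- [start_period, end_period] must be keys of the dict (stated dict-side: the distinct keys
-- lying in the interval number end-start+1 — checkable without walking the range).
def Pre_out_max_population (start_period : Int) (end_period : Int) (population : List (Int × Int)) : Prop :=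
  (population.map Prod.fst).contains start_period = true ∧
  (population.map Prod.fst).dedup.countP (fun k => decide (start_period ≤ k ∧ k ≤ end_period))
    = (end_period - start_period + 1).toNat
instance (start_period : Int) (end_period : Int) (population : List (Int × Int)) : Decidable (Pre_out_max_population start_period end_period population) := by unfold Pre_out_max_population; infer_instance

def pvWitness_out_max_population : Int × Int × (List (Int × Int)) := (2000, 2002, [(2000, 5), (2001, 7), (2002, 6)])

def Spec_out_max_population (start_period : Int) (end_period : Int) (population : List (Int × Int)) (out : String × String) : Prop := out = out_max_population_alt start_period end_period population
instance (start_period : Int) (end_period : Int) (population : List (Int × Int)) (out : String × String) : Decidable (Spec_out_max_population start_period end_period population out) := by unfold Spec_out_max_population; infer_instance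

-- ===== CLAIM (what is proved, stated in full; the proofs are below) =====
def Claim_equal_out_max_population : Prop := ∀ (start_period : Int) (end_period : Int) (population : List (Int × Int)), Dom_out_max_population start_period end_period population → Pre_out_max_population start_period end_period population → Spec_out_max_population start_period end_period population (out_max_population start_period end_period population)

-- ===== LEMMAS AND PROOFS =====

-- B's builtin max()/min() on a nonempty list are the plain running-best folds from the head
theorem pv_max?_cons (v : Int → Int) (a : Int) (l : List Int) :
    PySem.List.max? (a :: l) v
    = some (List.foldl (fun m y => if v m < v y then y else m) a l) := by
  induction l generalizing a with
  | nil => rfl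
  | cons x t ih =>
    simp only [PySem.List.max?, List.foldl] at ih ⊢
    by_cases h : v a < v x <;> simp only [h, ite_true, ite_false] <;> exact ih _

theorem pv_min?_cons (v : Int → Int) (a : Int) (l : List Int) :
    PySem.List.min? (a :: l) v
    = some (List.foldl (fun m y => if v y < v m then y else m) a l) := by
  induction l generalizing a with
  | nil => rfl
  | cons x t ih =>
    simp only [PySem.List.min?, List.foldl] at ih ⊢
    by_cases h : v x < v a <;> simp only [h, ite_true, ite_false] <;> exact ih _

-- A's (year, value) max accumulator computes the running-best year paired with its value
theorem pv_max_fold (v : Int → Int) (l : List Int) (a : Int) :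
    List.foldl (fun (p : Int × Int) i => if v i > p.2 then (i, v i) else p) (a, v a) l
    = (List.foldl (fun m y => if v m < v y then y else m) a l,
       v (List.foldl (fun m y => if v m < v y then y else m) a l)) := by
  induction l generalizing a with
  | nil => rfl
  | cons x t ih => simp only [List.foldl, gt_iff_lt]; by_cases h : v a < v x <;> simp [h, ih]

theorem pv_min_fold (v : Int → Int) (l : List Int) (a : Int) :
    List.foldl (fun (p : Int × Int) i => if v i < p.2 then (i, v i) else p) (a, v a) l
    = (List.foldl (fun m y => if v y < v m then y else m) a l,
       v (List.foldl (fun m y => if v y < v m then y else m) a l)) := by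
  induction l generalizing a with
  | nil => rfl
  | cons x t ih => simp only [List.foldl]; by_cases h : v x < v a <;> simp [h, ih]

-- A's coupled fold splits into independent max and min folds while min-value ≤ max-value
theorem pv_decouple (v : Int → Int) (l : List Int) :
    ∀ (mx mn : Int × Int), mn.2 ≤ mx.2 →
    List.foldl (fun (st : (Int × Int) × (Int × Int)) i =>
        if v i > st.1.2 then ((i, v i), st.2)
        else if v i < st.2.2 then (st.1, (i, v i))
        else st) (mx, mn) l
    = (List.foldl (fun (p : Int × Int) i => if v i > p.2 then (i, v i) else p) mx l,
       List.foldl (fun (p : Int × Int) i => if v i < p.2 then (i, v i) else p) mn l) := by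
  induction l with
  | nil => intro mx mn _; rfl
  | cons x t ih =>
    intro mx mn h
    simp only [List.foldl, gt_iff_lt]
    by_cases h1 : mx.2 < v x
    · have h2 : ¬ v x < mn.2 := by omega
      simp only [h1, if_pos, if_neg h2]
      exact ih (x, v x) mn (by simp; omega)
    · by_cases h2 : v x < mn.2
      · simp only [h1, ite_false, h2, ite_true]
        exact ih mx (x, v x) (by simp; omega)
      · simp only [h1, h2, ite_false]
        exact ih mx mn h

-- ===== VERDICT (by name: the statement is the Claim_ definition above) =====
theorem out_max_population_spec : Claim_equal_out_max_population := by
  intro s e pop _hdom _hpre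
  unfold Spec_out_max_population out_max_population out_max_population_alt
  set v : Int → Int := pvGetPop pop with hv
  by_cases hle : s ≤ e
  · -- nonempty period: the range starts with s, A's first iteration leaves the seed unchanged
    have hcons : PySem.List.pyRange s (e + 1) 1 = s :: PySem.List.pyRange (s + 1) (e + 1) 1 :=
      PySem.List.pyRange_one_cons (by omega : s < e + 1)
    rw [hcons]
    simp only [List.isEmpty_cons, ite_false, Bool.false_eq_true,
      List.foldl, gt_iff_lt, lt_irrefl, ite_false]
    rw [pv_max?_cons v, pv_min?_cons v,
        pv_decouple v _ (s, v s) (s, v s) le_rfl, pv_max_fold, pv_min_fold]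
  · -- empty period: A's loop runs zero times, B falls back to [start_period]
    have hnil : PySem.List.pyRange s (e + 1) 1 = [] :=
      PySem.List.pyRange_one_eq_nil (by omega : e + 1 ≤ s)
    rw [hnil]
    simp [PySem.List.max?, PySem.List.min?]
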